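-- pv_equiv track=rewrite | github.com/excelsky/Leet1337Code | HackerRank/Hired_binary_in_array.py | solution
-- ===== SOURCE A (Python) =====
-- def solution(arr):
--     # Type your solution here
--     if len(arr) <= 1:
--         return ""
--
--     new_arr = []
--     for a in arr:
--         if a >= 0:
--             new_arr.append(a)
--
--     n = len(new_arr)
--     possible_left_indices = [(i+1) * (i+2) // 2 for i in range(n)]
--
--     left_indices = []
--     right_indices = []
--     for i in possible_left_indices:
--         if i < n:
--             left_indices.append(i)
--             if i-1 > 0:
--                 right_indices.append(i-1)
--         elif i == n:
--             right_indices.append(i-1)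
--
--     left_sum = sum(list(new_arr[i] for i in left_indices))
--     right_sum = sum(list(new_arr[i] for i in right_indices))
--
--     if left_sum > right_sum:
--         return "Left"
--     elif left_sum < right_sum:
--         return "Right"
--     else:
--         return ""
-- ===== SOURCE B (Python) =====
-- def solution(arr):
--     if len(arr) <= 1:
--         return ""
--     new_arr = [a for a in arr if a >= 0]
--     n = len(new_arr)
--     # set of triangular numbers 1, 3, 6, ... up to n
--     tri = set()
--     t, step = 1, 2
--     while t <= n:
--         tri.add(t)
--         t += step
--         step += 1
--     left_sum = 0
--     right_sum = 0
--     for p, x in enumerate(new_arr):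
--         if p in tri:
--             left_sum += x
--         if p + 1 in tri and (p > 0 or p + 1 == n):
--             right_sum += x
--     if left_sum > right_sum:
--         return "Left"
--     elif left_sum < right_sum:
--         return "Right"
--     else:
--         return ""
-- ===== Notes on version B (the rewrite author's own statement) =====
-- stated objective: alternative
-- what changed: Inverts the traversal: instead of building the triangular-index list over range(n) and gathering elements into left/right index lists, B builds a hash set of the triangular numbers up to n once and makes a single enumerate pass over the filtered data, classifying each position by set membership.
import Mathlib
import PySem

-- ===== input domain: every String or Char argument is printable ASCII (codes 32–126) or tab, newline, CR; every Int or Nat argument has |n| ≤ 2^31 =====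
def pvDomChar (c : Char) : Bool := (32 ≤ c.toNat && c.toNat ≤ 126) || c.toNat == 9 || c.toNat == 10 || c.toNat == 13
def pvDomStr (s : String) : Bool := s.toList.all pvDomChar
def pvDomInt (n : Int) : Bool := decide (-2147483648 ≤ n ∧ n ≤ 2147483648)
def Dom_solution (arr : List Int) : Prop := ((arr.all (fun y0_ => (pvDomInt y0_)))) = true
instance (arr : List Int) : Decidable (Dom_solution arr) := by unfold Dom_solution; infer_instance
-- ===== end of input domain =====

-- B inverts the traversal: it builds a set of triangular numbers once and makes a single
-- enumerate pass over the data classifying each position by membership, instead of A's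
-- gathering of elements through explicitly built left/right index lists (objective: alternative).

-- ===== PORT A =====
-- literal transliteration of A: filter loop, triangular-index comprehension, index-list
-- building fold, then the two gather-and-sum expressions (new_arr[i] via pyGetD: every
-- collected index is in range, so Python never raises here).
def solution (arr : List Int) : String :=
  if arr.length ≤ 1 then ""
  else
    let new_arr := arr.foldl (fun acc a => if a ≥ 0 then acc ++ [a] else acc) []
    let n : Int := new_arr.length
    let possible_left_indices :=
      (PySem.List.pyRange 0 n 1).map (fun i => PySem.Int.floordiv ((i + 1) * (i + 2)) 2)
    let lr := possible_left_indices.foldl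
      (fun (p : List Int × List Int) i =>
        if i < n then (p.1 ++ [i], if i - 1 > 0 then p.2 ++ [i - 1] else p.2)
        else if i = n then (p.1, p.2 ++ [i - 1])
        else p) ([], [])
    let left_sum := (lr.1.map (fun i => PySem.List.pyGetD new_arr i 0)).sum
    let right_sum := (lr.2.map (fun i => PySem.List.pyGetD new_arr i 0)).sum
    if left_sum > right_sum then "Left"
    else if left_sum < right_sum then "Right"
    else ""

-- ===== PORT B =====
-- Source B's while loop filling the set of triangular numbers 1, 3, 6, … ≤ n; the fuel
-- (= n+1) only makes the recursion total, the loop condition is Source B's `t <= n`.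
def trifill (n : Int) : Nat → Int → Int → PySem.Set Int → PySem.Set Int
  | 0, _, _, s => s
  | fuel + 1, t, step, s =>
    if t ≤ n then trifill n fuel (t + step) (step + 1) (PySem.Set.add s t) else s

def solution_alt (arr : List Int) : String :=
  if arr.length ≤ 1 then ""
  else
    let new_arr := arr.filter (fun a => a ≥ 0)
    let n : Int := new_arr.length
    let tri := trifill n (new_arr.length + 1) 1 2 PySem.Set.empty
    let s := (PySem.List.enumerate new_arr 0).foldl
      (fun (s : Int × Int) pe =>
        (if PySem.Set.contains tri pe.1 then s.1 + pe.2 else s.1,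
         if PySem.Set.contains tri (pe.1 + 1) ∧ (pe.1 > 0 ∨ pe.1 + 1 = n) then s.2 + pe.2 else s.2))
      ((0 : Int), (0 : Int))
    if s.1 > s.2 then "Left" else if s.1 < s.2 then "Right" else ""

-- ===== PRECONDITION & SPEC =====
def Spec_solution (arr : List Int) (out : String) : Prop := out = solution_alt arr
instance (arr : List Int) (out : String) : Decidable (Spec_solution arr out) := by unfold Spec_solution; infer_instance

-- ===== CLAIM (what is proved, stated in full; the proofs are below) =====
def Claim_equal_solution : Prop := ∀ (arr : List Int), Dom_solution arr → Spec_solution arr (solution arr)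

-- ===== LEMMAS AND PROOFS =====

/-- Triangular numbers. -/
def pvT (j : Nat) : Nat := j * (j + 1) / 2

lemma pvT_succ (j : Nat) : pvT (j + 1) = pvT j + (j + 1) := by
  unfold pvT
  obtain ⟨m, hm⟩ := Nat.even_mul_succ_self j
  have h1 : (j + 1) * (j + 1 + 1) = 2 * (m + (j + 1)) := by nlinarith
  have h2 : j * (j + 1) = 2 * m := by omega
  rw [h1, h2, Nat.mul_div_cancel_left _ (by norm_num), Nat.mul_div_cancel_left _ (by norm_num)]

lemma pvT_le (j : Nat) : j ≤ pvT j := by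
  induction j with
  | zero => simp [pvT]
  | succ k ih => rw [pvT_succ]; omega

lemma pvT_lt_succ (j : Nat) : pvT j < pvT (j + 1) := by rw [pvT_succ]; omega

lemma pvT_mono {j k : Nat} (h : j ≤ k) : pvT j ≤ pvT k := by
  induction h with
  | refl => exact le_rfl
  | step _ ih => rename_i m _; exact le_trans ih (le_of_lt (pvT_lt_succ m))

/-- Bounded test for "p is a positive triangular number". -/
def pvIsTri (p : Nat) : Bool := (List.range (p + 1)).any (fun k => pvT (k + 1) == p)

lemma pvIsTri_iff (p : Nat) : pvIsTri p = true ↔ ∃ k, pvT (k + 1) = p := by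
  unfold pvIsTri
  simp only [List.any_eq_true, List.mem_range, beq_iff_eq]
  constructor
  · rintro ⟨k, _, h⟩; exact ⟨k, h⟩
  · rintro ⟨k, h⟩; exact ⟨k, by have := pvT_le (k + 1); omega, h⟩

lemma pvIsTri_pvT (k : Nat) : pvIsTri (pvT (k + 1)) = true := (pvIsTri_iff _).mpr ⟨k, rfl⟩

lemma pvIsTri_between {j p : Nat} (h1 : pvT j < p) (h2 : p < pvT (j + 1)) : pvIsTri p = false := by
  cases hb : pvIsTri p with
  | false => rfl
  | true =>
    exfalso
    obtain ⟨k, hk⟩ := (pvIsTri_iff p).mp hb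
    rcases Nat.lt_or_ge j (k + 1) with h | h
    · have := pvT_mono (show j + 1 ≤ k + 1 by omega); omega
    · have := pvT_mono h; omega

lemma pvIsTri_zero : pvIsTri 0 = false := by decide

/-- Sum of a map over range' all of whose terms vanish. -/
lemma pv_sum_range'_zero (H : Nat → Int) :
    ∀ (len a : Nat), (∀ k, a ≤ k → k < a + len → H k = 0) →
      ((List.range' a len).map H).sum = 0 := by
  intro len
  induction len with
  | zero => intro a _; simp
  | succ m ih =>
    intro a h
    rw [List.range'_succ, List.map_cons, List.sum_cons, h a le_rfl (by omega),
      ih (a + 1) (fun k h1 h2 => h k (by omega) (by omega))]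
    simp

lemma pv_range_split (m n : Nat) (h : m ≤ n) :
    List.range n = List.range m ++ List.range' m (n - m) := by
  obtain ⟨k, rfl⟩ : ∃ k, n = m + k := ⟨n - m, by omega⟩
  rw [List.range_add, List.range'_eq_map_range, Nat.add_sub_cancel_left]

lemma pv_sum_trunc (H : Nat → Int) (m n : Nat) (hmn : m ≤ n)
    (hz : ∀ k, m ≤ k → H k = 0) :
    ((List.range n).map H).sum = ((List.range m).map H).sum := by
  rw [pv_range_split m n hmn, List.map_append, List.sum_append,
    pv_sum_range'_zero H _ _ (fun k hk _ => hz k hk), add_zero]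

/-- For every n there is an m with T_m ≤ n < T_{m+1}. -/
lemma pv_exists_m (n : Nat) : ∃ m, m ≤ n ∧ pvT m ≤ n ∧ n < pvT (m + 1) := by
  induction n with
  | zero => exact ⟨0, le_rfl, by simp [pvT], by rw [pvT_succ]; simp [pvT]⟩
  | succ p ih =>
    obtain ⟨m, hm, h1, h2⟩ := ih
    by_cases h : pvT (m + 1) ≤ p + 1
    · refine ⟨m + 1, by have := pvT_le m; omega, h, ?_⟩
      rw [pvT_succ (m + 1)]; omega
    · exact ⟨m, by omega, by omega, by omega⟩

/-- The core reindexing: a sum over positions gated by `pvIsTri` equals the sum over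
triangular indices. -/
lemma pv_sum_tri (F : Nat → Int) :
    ∀ (m N : Nat), pvT m ≤ N → N < pvT (m + 1) →
      ((List.range (N + 1)).map (fun p => if pvIsTri p then F p else 0)).sum
        = ((List.range m).map (fun k => F (pvT (k + 1)))).sum := by
  intro m
  induction m with
  | zero =>
    intro N _ h2
    have hN : N = 0 := by have h0 : pvT (0 + 1) = 1 := by decide
                          omega
    subst hN
    simp [List.range_succ, pvIsTri_zero]
  | succ m ih =>
    intro N h1 h2
    have hmm := pvT_lt_succ m
    have hT1 : pvT (m + 1) + 1 ≤ N + 1 := by omega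
    rw [pv_range_split (pvT (m + 1) + 1) (N + 1) hT1, List.map_append, List.sum_append,
      pv_sum_range'_zero _ _ _ (fun p hp1 hp2 => by
        rw [pvIsTri_between (show pvT (m + 1) < p by omega)
          (show p < pvT (m + 1 + 1) by rw [pvT_succ (m + 1)] at h2 ⊢; omega)]
        simp), add_zero]
    rw [pv_range_split (pvT m + 1) (pvT (m + 1) + 1) (by omega), List.map_append, List.sum_append]
    have hlen : pvT (m + 1) + 1 - (pvT m + 1) = m + 1 := by rw [pvT_succ]; omega
    rw [hlen, List.range'_concat, List.map_append, List.sum_append,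
      pv_sum_range'_zero _ _ _ (fun p hp1 hp2 => by
        rw [pvIsTri_between (show pvT m < p by omega)
          (show p < pvT (m + 1) by rw [pvT_succ]; omega)]
        simp)]
    rw [show pvT m + 1 + 1 * m = pvT (m + 1) from by rw [pvT_succ]; omega,
      ih (pvT m) le_rfl (pvT_lt_succ m), List.range_succ, List.map_append, List.sum_append]
    simp [pvIsTri_pvT]

/-- Membership in the set built by B's while loop. -/
lemma pv_trifill_mem (N : Int) :
    ∀ (fuel j : Nat) (s : PySem.Set Int) (x : Int), N < (j : Int) + (fuel : Int) →
      (x ∈ trifill N fuel ((pvT (j + 1) : Nat) : Int) ((j : Int) + 2) s ↔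
        x ∈ s ∨ ∃ k : Nat, j < k ∧ ((pvT k : Nat) : Int) ≤ N ∧ x = ((pvT k : Nat) : Int)) := by
  intro fuel
  induction fuel with
  | zero =>
    intro j s x hN
    simp only [trifill]
    constructor
    · exact Or.inl
    · rintro (h | ⟨k, hk1, hk2, -⟩)
      · exact h
      · exfalso
        have h1 : k ≤ pvT k := pvT_le k
        have h2 : ((k : Nat) : Int) ≤ ((pvT k : Nat) : Int) := by exact_mod_cast h1
        have h3 : ((j : Nat) : Int) < ((k : Nat) : Int) := by exact_mod_cast hk1
        simp only [Nat.cast_zero, add_zero] at hN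
        omega
  | succ fuel ih =>
    intro j s x hN
    rw [trifill]
    by_cases hle : ((pvT (j + 1) : Nat) : Int) ≤ N
    · rw [if_pos hle]
      have harg1 : ((pvT (j + 1) : Nat) : Int) + ((j : Int) + 2) = ((pvT (j + 1 + 1) : Nat) : Int) := by
        rw [pvT_succ (j + 1)]; push_cast; ring
      have harg2 : (j : Int) + 2 + 1 = ((j + 1 : Nat) : Int) + 2 := by push_cast; ring
      rw [harg1, harg2, ih (j + 1) (PySem.Set.add s ((pvT (j + 1) : Nat) : Int)) x
        (by push_cast at hN ⊢; omega)]
      rw [PySem.Set.mem_add]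
      constructor
      · rintro ((h | h) | ⟨k, hk1, hk2, hx⟩)
        · exact Or.inl h
        · exact Or.inr ⟨j + 1, by omega, hle, h⟩
        · exact Or.inr ⟨k, by omega, hk2, hx⟩
      · rintro (h | ⟨k, hk1, hk2, hx⟩)
        · exact Or.inl (Or.inl h)
        · rcases eq_or_lt_of_le (show j + 1 ≤ k by omega) with h | h
          · exact Or.inl (Or.inr (by rw [hx, ← h]))
          · exact Or.inr ⟨k, h, hk2, hx⟩
    · rw [if_neg hle]
      constructor
      · exact Or.inl
      · rintro (h | ⟨k, hk1, hk2, -⟩)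
        · exact h
        · exfalso
          have h1 : pvT (j + 1) ≤ pvT k := pvT_mono (by omega)
          have h2 : ((pvT (j + 1) : Nat) : Int) ≤ ((pvT k : Nat) : Int) := by exact_mod_cast h1
          omega

lemma pv_tri_contains_iff (n p : Nat) :
    PySem.Set.contains (trifill (n : Int) (n + 1) 1 2 PySem.Set.empty) ((p : Nat) : Int) = true ↔
      (pvIsTri p = true ∧ p ≤ n) := by
  have h := pv_trifill_mem (n : Int) (n + 1) 0 PySem.Set.empty ((p : Nat) : Int)
    (by push_cast; omega)
  have e1 : ((pvT (0 + 1) : Nat) : Int) = 1 := by norm_num [pvT]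
  have e2 : ((0 : Nat) : Int) + 2 = 2 := by norm_num
  rw [e1, e2] at h
  rw [PySem.Set.contains_iff, h]
  simp only [PySem.Set.empty, List.not_mem_nil, false_or]
  constructor
  · rintro ⟨k, hk1, hk2, hx⟩
    have hpk : p = pvT k := by exact_mod_cast hx
    have hkn : pvT k ≤ n := by exact_mod_cast hk2
    refine ⟨(pvIsTri_iff p).mpr ⟨k - 1, ?_⟩, by omega⟩
    rw [show k - 1 + 1 = k by omega, hpk]
  · rintro ⟨ht, hle⟩
    obtain ⟨k, hk⟩ := (pvIsTri_iff p).mp ht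
    exact ⟨k + 1, by omega, by rw [hk]; exact_mod_cast hle, by rw [hk]⟩

/-- A's fold step building the two index lists. -/
def pvStepA (n : Int) (p : List Int × List Int) (i : Int) : List Int × List Int :=
  if i < n then (p.1 ++ [i], if i - 1 > 0 then p.2 ++ [i - 1] else p.2)
  else if i = n then (p.1, p.2 ++ [i - 1])
  else p

/-- The same step tracked directly on the two sums. -/
def pvStepS (a : List Int) (n : Int) (s : Int × Int) (i : Int) : Int × Int :=
  if i < n then (s.1 + PySem.List.pyGetD a i 0,
                 if i - 1 > 0 then s.2 + PySem.List.pyGetD a (i - 1) 0 else s.2)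
  else if i = n then (s.1, s.2 + PySem.List.pyGetD a (i - 1) 0)
  else s

/-- Summing the gathered elements of the index lists = accumulating sums in the fold. -/
lemma pv_sum_fold (a : List Int) (n : Int) :
    ∀ (l : List Int) (L R : List Int),
      (((l.foldl (pvStepA n) (L, R)).1.map (fun i => PySem.List.pyGetD a i 0)).sum,
       ((l.foldl (pvStepA n) (L, R)).2.map (fun i => PySem.List.pyGetD a i 0)).sum)
      = l.foldl (pvStepS a n)
          ((L.map (fun i => PySem.List.pyGetD a i 0)).sum,
           (R.map (fun i => PySem.List.pyGetD a i 0)).sum) := by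
  intro l
  induction l with
  | nil => intro L R; simp
  | cons x xs ih =>
    intro L R
    simp only [List.foldl_cons]
    by_cases h1 : x < n
    · by_cases h2 : x - 1 > 0
      · have eA : pvStepA n (L, R) x = (L ++ [x], R ++ [x - 1]) := by
          unfold pvStepA; rw [if_pos h1, if_pos h2]
        have eS : pvStepS a n
            ((L.map (fun i => PySem.List.pyGetD a i 0)).sum, (R.map (fun i => PySem.List.pyGetD a i 0)).sum) x
            = (((L ++ [x]).map (fun i => PySem.List.pyGetD a i 0)).sum,
               ((R ++ [x - 1]).map (fun i => PySem.List.pyGetD a i 0)).sum) := by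
          unfold pvStepS; rw [if_pos h1, if_pos h2]; simp
        rw [eA, eS]; exact ih _ _
      · have eA : pvStepA n (L, R) x = (L ++ [x], R) := by
          unfold pvStepA; rw [if_pos h1, if_neg h2]
        have eS : pvStepS a n
            ((L.map (fun i => PySem.List.pyGetD a i 0)).sum, (R.map (fun i => PySem.List.pyGetD a i 0)).sum) x
            = (((L ++ [x]).map (fun i => PySem.List.pyGetD a i 0)).sum,
               (R.map (fun i => PySem.List.pyGetD a i 0)).sum) := by
          unfold pvStepS; rw [if_pos h1, if_neg h2]; simp
        rw [eA, eS]; exact ih _ _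
    · by_cases h3 : x = n
      · have eA : pvStepA n (L, R) x = (L, R ++ [x - 1]) := by
          unfold pvStepA; rw [if_neg h1, if_pos h3]
        have eS : pvStepS a n
            ((L.map (fun i => PySem.List.pyGetD a i 0)).sum, (R.map (fun i => PySem.List.pyGetD a i 0)).sum) x
            = ((L.map (fun i => PySem.List.pyGetD a i 0)).sum,
               ((R ++ [x - 1]).map (fun i => PySem.List.pyGetD a i 0)).sum) := by
          unfold pvStepS; rw [if_neg h1, if_pos h3]; simp
        rw [eA, eS]; exact ih _ _
      · have eA : pvStepA n (L, R) x = (L, R) := by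
          unfold pvStepA; rw [if_neg h1, if_neg h3]
        have eS : pvStepS a n
            ((L.map (fun i => PySem.List.pyGetD a i 0)).sum, (R.map (fun i => PySem.List.pyGetD a i 0)).sum) x
            = ((L.map (fun i => PySem.List.pyGetD a i 0)).sum,
               (R.map (fun i => PySem.List.pyGetD a i 0)).sum) := by
          unfold pvStepS; rw [if_neg h1, if_neg h3]
        rw [eA, eS]; exact ih _ _

/-- A's triangular-index comprehension is the cast of pvT. -/
lemma pv_possible (n : Nat) :
    (PySem.List.pyRange 0 (n : Int) 1).map (fun i => PySem.Int.floordiv ((i + 1) * (i + 2)) 2)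
    = (List.range n).map (fun i => ((pvT (i + 1) : Nat) : Int)) := by
  rw [PySem.List.pyRange_zero_nat, List.map_map]
  apply List.map_congr_left
  intro i _
  show PySem.Int.floordiv (((i : Int) + 1) * ((i : Int) + 2)) 2 = _
  have h1 : ((i : Int) + 1) * ((i : Int) + 2) = (((i + 1) * (i + 2) : Nat) : Int) := by push_cast; ring
  rw [h1, show (2 : Int) = ((2 : Nat) : Int) from rfl, PySem.Int.floordiv_natCast]
  norm_cast

/-- The two per-index summands, as functions of the Int index (A's side)… -/
def pvFA (a : List Int) (n i : Int) : Int := if i < n then PySem.List.pyGetD a i 0 else 0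
def pvFG (a : List Int) (n i : Int) : Int :=
  if i < n then (if i - 1 > 0 then PySem.List.pyGetD a (i - 1) 0 else 0)
  else if i = n then PySem.List.pyGetD a (i - 1) 0 else 0

/-- …and as functions of the Nat position (the common form). -/
def pvFL (a : List Int) (n p : Nat) : Int := if p < n then a.getD p 0 else 0
def pvFR (a : List Int) (n p : Nat) : Int :=
  if p < n then (if 1 < p then a.getD (p - 1) 0 else 0)
  else if p = n then a.getD (p - 1) 0 else 0

lemma pvStepS_eq (a : List Int) (n : Int) (s : Int × Int) (i : Int) :
    pvStepS a n s i = (s.1 + pvFA a n i, s.2 + pvFG a n i) := by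
  unfold pvStepS pvFA pvFG
  split_ifs <;> simp

lemma pv_foldl_pair {α : Type} (f g : α → Int) :
    ∀ (l : List α) (ls rs : Int),
      l.foldl (fun s e => (s.1 + f e, s.2 + g e)) (ls, rs)
        = (ls + (l.map f).sum, rs + (l.map g).sum) := by
  intro l
  induction l with
  | nil => intro ls rs; simp
  | cons x xs ih =>
    intro ls rs
    simp only [List.foldl_cons, List.map_cons, List.sum_cons]
    rw [ih]
    simp [add_assoc]

lemma pvFA_cast (a : List Int) (n p : Nat) : pvFA a (n : Int) ((p : Nat) : Int) = pvFL a n p := by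
  unfold pvFA pvFL
  by_cases h : p < n
  · rw [if_pos (by exact_mod_cast h), if_pos h, PySem.List.pyGetD_natCast]
  · rw [if_neg (by exact_mod_cast h), if_neg h]

lemma pvFG_cast (a : List Int) (n p : Nat) (hp : 1 ≤ p) :
    pvFG a (n : Int) ((p : Nat) : Int) = pvFR a n p := by
  unfold pvFG pvFR
  have hc : ((p : Nat) : Int) - 1 = ((p - 1 : Nat) : Int) := by omega
  by_cases h : p < n
  · rw [if_pos (by exact_mod_cast h : ((p : Nat) : Int) < (n : Int)), if_pos h]
    by_cases h2 : 1 < p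
    · rw [if_pos (by omega : ((p : Nat) : Int) - 1 > 0), if_pos h2, hc, PySem.List.pyGetD_natCast]
    · rw [if_neg (by omega : ¬ ((p : Nat) : Int) - 1 > 0), if_neg h2]
  · rw [if_neg (by exact_mod_cast h : ¬ ((p : Nat) : Int) < (n : Int)), if_neg h]
    by_cases h3 : p = n
    · rw [if_pos (by exact_mod_cast h3), if_pos h3, hc, PySem.List.pyGetD_natCast]
    · rw [if_neg (by exact_mod_cast h3 : ¬ ((p : Nat) : Int) = (n : Int)), if_neg h3]

lemma pv_ite_add (c : Prop) [Decidable c] (s x : Int) :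
    (if c then s + x else s) = s + (if c then x else 0) := by split_ifs <;> simp

/-- B's left summand at a position p < n equals the common gated form. -/
lemma pvB_left (a : List Int) (p : Nat) (hp : p < a.length) :
    (if PySem.Set.contains (trifill ((a.length : Nat) : Int) (a.length + 1) 1 2 PySem.Set.empty)
        ((p : Nat) : Int) then a.getD p 0 else 0)
      = (if pvIsTri p then pvFL a a.length p else 0) := by
  by_cases ht : pvIsTri p = true
  · rw [if_pos ((pv_tri_contains_iff a.length p).mpr ⟨ht, by omega⟩), if_pos ht]
    unfold pvFL; rw [if_pos hp]
  · have hc : PySem.Set.contains (trifill ((a.length : Nat) : Int) (a.length + 1) 1 2 PySem.Set.empty)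
        ((p : Nat) : Int) = false := by
      cases hb : PySem.Set.contains (trifill ((a.length : Nat) : Int) (a.length + 1) 1 2
          PySem.Set.empty) ((p : Nat) : Int) with
      | false => rfl
      | true => exact absurd ((pv_tri_contains_iff a.length p).mp hb).1 ht
    rw [if_neg (fun h => by rw [hc] at h; simp at h), if_neg ht]

/-- B's right summand at a position q < n equals the common gated form at q+1. -/
lemma pvB_right (a : List Int) (q : Nat) (hq : q < a.length) :
    (if PySem.Set.contains (trifill ((a.length : Nat) : Int) (a.length + 1) 1 2 PySem.Set.empty)
        (((q : Nat) : Int) + 1) ∧ (((q : Nat) : Int) > 0 ∨ ((q : Nat) : Int) + 1 = ((a.length : Nat) : Int))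
      then a.getD q 0 else 0)
      = (if pvIsTri (q + 1) then pvFR a a.length (q + 1) else 0) := by
  have hcast : ((q : Nat) : Int) + 1 = ((q + 1 : Nat) : Int) := by push_cast; ring
  by_cases ht : pvIsTri (q + 1) = true
  · rw [if_pos ht]
    have hcon : PySem.Set.contains (trifill ((a.length : Nat) : Int) (a.length + 1) 1 2
        PySem.Set.empty) (((q : Nat) : Int) + 1) = true := by
      rw [hcast]; exact (pv_tri_contains_iff a.length (q + 1)).mpr ⟨ht, by omega⟩
    by_cases h2 : 0 < q ∨ q + 1 = a.length
    · have hc2 : ((q : Nat) : Int) > 0 ∨ ((q : Nat) : Int) + 1 = ((a.length : Nat) : Int) := by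
        rcases h2 with h | h
        · exact Or.inl (by exact_mod_cast h)
        · exact Or.inr (by exact_mod_cast h)
      rw [if_pos ⟨hcon, hc2⟩]
      unfold pvFR
      by_cases h3 : q + 1 < a.length
      · have h4 : 1 < q + 1 := by omega
        rw [if_pos h3, if_pos h4]; simp
      · have h5 : q + 1 = a.length := by omega
        rw [if_neg h3, if_pos h5]; simp
    · have hc2 : ¬ (((q : Nat) : Int) > 0 ∨ ((q : Nat) : Int) + 1 = ((a.length : Nat) : Int)) := by
        rintro (h | h)
        · exact h2 (Or.inl (by exact_mod_cast h))
        · exact h2 (Or.inr (by exact_mod_cast h))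
      rw [if_neg (by rintro ⟨-, h⟩; exact hc2 h)]
      unfold pvFR
      have hq0 : q = 0 := by omega
      have h3 : q + 1 < a.length := by omega
      rw [if_pos h3, if_neg (by omega : ¬ 1 < q + 1)]
  · rw [if_neg ht]
    have hcon : PySem.Set.contains (trifill ((a.length : Nat) : Int) (a.length + 1) 1 2
        PySem.Set.empty) (((q : Nat) : Int) + 1) = false := by
      rw [hcast]
      cases hb : PySem.Set.contains (trifill ((a.length : Nat) : Int) (a.length + 1) 1 2
          PySem.Set.empty) ((q + 1 : Nat) : Int) with
      | false => rfl
      | true => exact absurd ((pv_tri_contains_iff a.length (q + 1)).mp hb).1 ht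
    rw [if_neg (by rintro ⟨h, -⟩; rw [hcon] at h; exact absurd h (by simp))]

/-- A's fold over the triangular comprehension (after the filter rewrite). -/
def pvAfold (a : List Int) : List Int × List Int :=
  ((List.range a.length).map (fun i => ((pvT (i + 1) : Nat) : Int))).foldl
    (pvStepA (a.length : Int)) ([], [])

/-- B's enumerate fold (after the filter rewrite). -/
def pvBfold (a : List Int) : Int × Int :=
  (PySem.List.enumerate a 0).foldl
    (fun (s : Int × Int) pe =>
      (if PySem.Set.contains (trifill ((a.length : Nat) : Int) (a.length + 1) 1 2
          PySem.Set.empty) pe.1 then s.1 + pe.2 else s.1,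
       if PySem.Set.contains (trifill ((a.length : Nat) : Int) (a.length + 1) 1 2
          PySem.Set.empty) (pe.1 + 1) ∧ (pe.1 > 0 ∨ pe.1 + 1 = ((a.length : Nat) : Int))
        then s.2 + pe.2 else s.2)) ((0 : Int), (0 : Int))

/-- The heart of the equivalence: for the filtered array, A's pair of sums equals
B's pair of sums. -/
lemma pv_pairs_eq (a : List Int) :
    (((pvAfold a).1.map (fun i => PySem.List.pyGetD a i 0)).sum,
     ((pvAfold a).2.map (fun i => PySem.List.pyGetD a i 0)).sum) = pvBfold a := by
  unfold pvAfold pvBfold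
  set n := a.length with hn
  set tri := trifill ((n : Nat) : Int) (n + 1) 1 2 PySem.Set.empty with htri
  obtain ⟨m, hmn, hm1, hm2⟩ := pv_exists_m n
  -- ===== A's side =====
  have hA := pv_sum_fold a (n : Int) ((List.range n).map (fun i => ((pvT (i + 1) : Nat) : Int))) [] []
  simp only [List.map_nil, List.sum_nil] at hA
  rw [hA]
  have hstepS : pvStepS a (n : Int) = fun s i => (s.1 + pvFA a (n : Int) i, s.2 + pvFG a (n : Int) i) :=
    funext fun s => funext fun i => pvStepS_eq a (n : Int) s i
  rw [hstepS, pv_foldl_pair, zero_add, zero_add, List.map_map, List.map_map]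
  have hAL : ((List.range n).map ((fun i => pvFA a (n : Int) i) ∘ fun i => ((pvT (i + 1) : Nat) : Int)))
      = (List.range n).map (fun k => pvFL a n (pvT (k + 1))) :=
    List.map_congr_left (fun k _ => pvFA_cast a n (pvT (k + 1)))
  have hAR : ((List.range n).map ((fun i => pvFG a (n : Int) i) ∘ fun i => ((pvT (i + 1) : Nat) : Int)))
      = (List.range n).map (fun k => pvFR a n (pvT (k + 1))) :=
    List.map_congr_left (fun k _ => pvFG_cast a n (pvT (k + 1)) (le_trans (by omega) (pvT_le (k + 1))))
  rw [hAL, hAR]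
  rw [pv_sum_trunc (fun k => pvFL a n (pvT (k + 1))) m n hmn (fun k hk => by
      have h : n < pvT (k + 1) := lt_of_lt_of_le hm2 (pvT_mono (by omega))
      show pvFL a n (pvT (k + 1)) = 0
      unfold pvFL; rw [if_neg (by omega)]),
    pv_sum_trunc (fun k => pvFR a n (pvT (k + 1))) m n hmn (fun k hk => by
      have h : n < pvT (k + 1) := lt_of_lt_of_le hm2 (pvT_mono (by omega))
      show pvFR a n (pvT (k + 1)) = 0
      unfold pvFR; rw [if_neg (by omega), if_neg (by omega)])]
  -- ===== B's side =====
  rw [PySem.List.enumerate_eq_map_pyRange a 0]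
  have hlen : (PySem.List.len a) = ((n : Nat) : Int) := by simp [PySem.List.len, hn]
  rw [hlen, PySem.List.pyRange_zero_nat, List.map_map]
  have hstepB : (fun (s : Int × Int) pe =>
      ((if PySem.Set.contains tri (Prod.fst pe) then s.1 + Prod.snd pe else s.1),
       (if PySem.Set.contains tri (Prod.fst pe + 1) ∧ (Prod.fst pe > 0 ∨ Prod.fst pe + 1 = ((n : Nat) : Int))
        then s.2 + Prod.snd pe else s.2)))
      = (fun (s : Int × Int) pe =>
          (s.1 + (if PySem.Set.contains tri (Prod.fst pe) then Prod.snd pe else 0),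
           s.2 + (if PySem.Set.contains tri (Prod.fst pe + 1) ∧ (Prod.fst pe > 0 ∨ Prod.fst pe + 1 = ((n : Nat) : Int))
                  then Prod.snd pe else 0))) := by
    funext s pe
    rw [pv_ite_add, pv_ite_add]
  rw [hstepB, pv_foldl_pair, zero_add, zero_add, List.map_map, List.map_map]
  have hBL : ((List.range n).map
        ((fun pe : Int × Int => if PySem.Set.contains tri pe.1 then pe.2 else 0)
          ∘ ((fun j => ((j : Int), PySem.List.pyGetD a j 0)) ∘ (Nat.cast : Nat → Int))))
      = (List.range n).map (fun p => if pvIsTri p then pvFL a n p else 0) := by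
    apply List.map_congr_left
    intro p hp
    have hp' : p < n := List.mem_range.mp hp
    show (if PySem.Set.contains tri ((p : Nat) : Int) then PySem.List.pyGetD a ((p : Nat) : Int) 0 else 0) = _
    rw [PySem.List.pyGetD_natCast]
    exact pvB_left a p hp'
  have hBR : ((List.range n).map
        ((fun pe : Int × Int => if PySem.Set.contains tri (pe.1 + 1) ∧ (pe.1 > 0 ∨ pe.1 + 1 = ((n : Nat) : Int)) then pe.2 else 0)
          ∘ ((fun j => ((j : Int), PySem.List.pyGetD a j 0)) ∘ (Nat.cast : Nat → Int))))
      = (List.range n).map (fun q => if pvIsTri (q + 1) then pvFR a n (q + 1) else 0) := by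
    apply List.map_congr_left
    intro q hq
    have hq' : q < n := List.mem_range.mp hq
    show (if PySem.Set.contains tri (((q : Nat) : Int) + 1) ∧ (((q : Nat) : Int) > 0 ∨ ((q : Nat) : Int) + 1 = ((n : Nat) : Int))
        then PySem.List.pyGetD a ((q : Nat) : Int) 0 else 0) = _
    rw [PySem.List.pyGetD_natCast]
    exact pvB_right a q hq'
  rw [hBL, hBR]
  -- ===== both sides are the common gated sums =====
  have hcommonL : ((List.range n).map (fun p => if pvIsTri p then pvFL a n p else 0)).sum
      = ((List.range (n + 1)).map (fun p => if pvIsTri p then pvFL a n p else 0)).sum := by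
    rw [List.range_succ, List.map_append, List.sum_append]
    have hz : pvFL a n n = 0 := by unfold pvFL; rw [if_neg (by omega)]
    simp [hz]
  have hcommonR : ((List.range n).map (fun q => if pvIsTri (q + 1) then pvFR a n (q + 1) else 0)).sum
      = ((List.range (n + 1)).map (fun p => if pvIsTri p then pvFR a n p else 0)).sum := by
    rw [List.range_succ_eq_map, List.map_cons, List.sum_cons, pvIsTri_zero, List.map_map]
    simp only [Bool.false_eq_true, if_false, zero_add]
    congr 1
  rw [hcommonL, hcommonR, pv_sum_tri (pvFL a n) m n hm1 hm2, pv_sum_tri (pvFR a n) m n hm1 hm2]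

-- ===== VERDICT (by name: the statement is the Claim_ definition above) =====
theorem solution_spec : Claim_equal_solution := by
  intro arr _
  unfold Spec_solution
  by_cases hlen : arr.length ≤ 1
  · simp [solution, solution_alt, hlen]
  · have hfilt : arr.foldl (fun acc a => if a ≥ 0 then acc ++ [a] else acc) []
        = arr.filter (fun a => a ≥ 0) := by
      rw [PySem.List.foldl_append_ite_eq_filter]
      simp
    simp only [solution, solution_alt, if_neg hlen]
    rw [hfilt]
    set a := arr.filter (fun a => decide (a ≥ 0)) with ha
    rw [pv_possible a.length]
    have h := pv_pairs_eq a
    simp only [pvAfold, pvBfold] at h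
    rw [← h]
    rfl
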